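-- pv_equiv track=rewrite | github.com/CodeMyMusic/Ateliers2023 | python/Atelier_3/Ex1.py | full_name_without_functions
-- ===== SOURCE A (Python) =====
-- def full_name_without_functions(str_arg: str) -> str:
--     """Renvoie le nom prénom formaté
--
--     Args:
--         str_arg (str): nom prenom
--
--     Returns:
--         str: nom prenom formaté
--     """
--     # Tant qu'on ne trouve pas le nom
--     nomTrouve = False
--     # pour que la première du prénom soit
--     # convertie en majuscule
--     premiereLettrePrenom = True
--
--     # résultat final
--     full_name = ''
--
--     # on parcoure le nom prénom non formaté
--     for char in str_arg:
--         # s'il y a un espace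
--         if char == ' ':
--             full_name += ' '
--             # le nom est trouvé
--             nomTrouve = True
--         else:
--             # si le nom n'est pas trouvé
--             if not nomTrouve:
--                 # on convertir en majuscule
--                 full_name += to_majuscule(char)
--             else:
--                 # s'éxécute une seule fois pour mettre la
--                 # première lettre en majuscule
--                 if premiereLettrePrenom:
--                     full_name += to_majuscule(char)
--                     premiereLettrePrenom = False
--                 else:
--                     # si c'est une minuscule
--                     if 97 <= ord(char) <= 122:
--                         # on ajoute juste
--                         full_name += char
--                     else:
--                         # on convertit en minuscule et on ajoute
--                         full_name += chr(ord(char) + 32)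
--
--     return full_name
--
-- def to_majuscule(c : chr)-> chr:
--     # on vérifie si ce n'est pas une majuscule
--     if ord(c) < 65 or ord(c) > 90:
--         # on convertit en majuscule
--         c = chr(ord(c) - 32)
--     return c
-- ===== SOURCE B (Python) =====
-- def to_majuscule(c):
--     # same ASCII arithmetic as the original helper
--     if ord(c) < 65 or ord(c) > 90:
--         c = chr(ord(c) - 32)
--     return c
--
--
-- def full_name_without_functions(str_arg: str) -> str:
--     # split at the first space, uppercase the surname wholesale, then
--     # capitalize the first non-space char of the remainder with an armed flag
--     head, sep, rest = str_arg.partition(' ')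
--     surname = ''.join(to_majuscule(c) for c in head)
--     if not sep:
--         return surname
--     out = []
--     armed = True
--     for c in rest:
--         if c == ' ':
--             out.append(' ')
--         elif armed:
--             out.append(to_majuscule(c))
--             armed = False
--         else:
--             out.append(c if 97 <= ord(c) <= 122 else chr(ord(c) + 32))
--     return surname + ' ' + ''.join(out)
-- ===== Notes on version B (the rewrite author's own statement) =====
-- stated objective: alternative
-- what changed: B replaces A's single state-machine loop with two booleans by a split at the first space (str.partition): the surname is mapped through to_majuscule wholesale, and only the remainder is walked with one armed flag for the firstname initial.
import Mathlib
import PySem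

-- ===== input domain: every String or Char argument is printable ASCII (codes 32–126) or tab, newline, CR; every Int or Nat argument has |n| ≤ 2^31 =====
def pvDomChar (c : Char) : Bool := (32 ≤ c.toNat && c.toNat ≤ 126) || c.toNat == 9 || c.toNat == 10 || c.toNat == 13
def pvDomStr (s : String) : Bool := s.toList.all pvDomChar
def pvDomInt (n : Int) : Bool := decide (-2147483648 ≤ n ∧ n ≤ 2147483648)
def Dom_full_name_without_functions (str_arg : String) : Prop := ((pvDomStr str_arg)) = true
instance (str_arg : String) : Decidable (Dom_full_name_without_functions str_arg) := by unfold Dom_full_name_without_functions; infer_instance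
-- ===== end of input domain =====

-- B splits at the first space instead of running A's two-flag state machine; same exact output (objective: alternative).

-- ===== PORT A =====
-- helper to_majuscule: exact on Pre_ (ord c ≥ 32 wherever it is applied); Nat subtraction, Char.ofNat stay in range there
def pyToMaj (c : Char) : Char :=
  if c.toNat < 65 ∨ c.toNat > 90 then Char.ofNat (c.toNat - 32) else c

def stepA (st : Bool × Bool × List Char) (c : Char) : Bool × Bool × List Char :=
  match st with
  | (nomTrouve, prem, fn) =>
    if c = ' ' then (true, prem, fn ++ [' '])
    else if nomTrouve = false then (nomTrouve, prem, fn ++ [pyToMaj c])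
    else if prem then (nomTrouve, false, fn ++ [pyToMaj c])
    else if 97 ≤ c.toNat ∧ c.toNat ≤ 122 then (nomTrouve, prem, fn ++ [c])
    else (nomTrouve, prem, fn ++ [Char.ofNat (c.toNat + 32)])

def full_name_without_functions (str_arg : String) : String :=
  String.mk (str_arg.toList.foldl stepA (false, true, [])).2.2

-- ===== PORT B =====
def stepB (st : Bool × List Char) (c : Char) : Bool × List Char :=
  match st with
  | (armed, out) =>
    if c = ' ' then (armed, out ++ [' '])
    else if armed then (false, out ++ [pyToMaj c])
    else if 97 ≤ c.toNat ∧ c.toNat ≤ 122 then (armed, out ++ [c])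
    else (armed, out ++ [Char.ofNat (c.toNat + 32)])

def full_name_without_functions_alt (str_arg : String) : String :=
  let l := str_arg.toList
  -- str.partition(' ')
  let head := l.takeWhile (· ≠ ' ')
  let rest := l.dropWhile (· ≠ ' ')
  let surname := head.map pyToMaj
  match rest with
  | [] => String.mk surname
  | _ :: rest' =>
      String.mk (surname ++ [' '] ++ (rest'.foldl stepB (true, [])).2)

-- ===== PRECONDITION & SPEC =====
-- Pre_ excludes exactly the inputs on which Python A raises ValueError: a control character (code < 32,
-- i.e. tab/newline/CR inside Dom) in the surname part or as the first non-space character after the first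
-- space, where to_majuscule computes chr(ord(c)-32) with a negative argument. B raises there too.
def Pre_full_name_without_functions (str_arg : String) : Prop :=
  ((str_arg.toList.takeWhile (· ≠ ' ')).all (fun c => 32 ≤ c.toNat) &&
   ((((str_arg.toList.dropWhile (· ≠ ' ')).drop 1).dropWhile (· = ' ')).take 1).all (fun c => 32 ≤ c.toNat)) = true
instance (str_arg : String) : Decidable (Pre_full_name_without_functions str_arg) := by
  unfold Pre_full_name_without_functions; infer_instance
def pvWitness_full_name_without_functions : String := "do je"

def Spec_full_name_without_functions (str_arg : String) (out : String) : Prop := out = full_name_without_functions_alt str_arg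
instance (str_arg : String) (out : String) : Decidable (Spec_full_name_without_functions str_arg out) := by unfold Spec_full_name_without_functions; infer_instance

-- ===== CLAIM (what is proved, stated in full; the proofs are below) =====
def Claim_equal_full_name_without_functions : Prop := ∀ (str_arg : String), Dom_full_name_without_functions str_arg → Pre_full_name_without_functions str_arg → Spec_full_name_without_functions str_arg (full_name_without_functions str_arg)

-- ===== LEMMAS AND PROOFS =====

-- the per-char rule after the firstname initial has been emitted
def pvLower (c : Char) : Char :=
  if c = ' ' then ' '
  else if 97 ≤ c.toNat ∧ c.toNat ≤ 122 then c
  else Char.ofNat (c.toNat + 32)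

-- output of the armed phase (after the first space)
def pvArmedOut : List Char → List Char
  | [] => []
  | c :: r => if c = ' ' then ' ' :: pvArmedOut r else pyToMaj c :: r.map pvLower

-- output of the whole function
def pvOut : List Char → List Char
  | [] => []
  | c :: r => if c = ' ' then ' ' :: pvArmedOut r else pyToMaj c :: pvOut r

theorem stepA_phase3 (r : List Char) (acc : List Char) :
    r.foldl stepA (true, false, acc) = (true, false, acc ++ r.map pvLower) := by
  induction r generalizing acc with
  | nil => simp
  | cons c r ih =>
    by_cases hc : c = ' '
    · simp [List.foldl_cons, stepA, hc, ih, pvLower]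
    · by_cases hl : 97 ≤ c.toNat ∧ c.toNat ≤ 122
      · simp [List.foldl_cons, stepA, hc, hl, ih, pvLower]
      · simp [List.foldl_cons, stepA, hc, hl, ih, pvLower]

theorem stepA_armed (r : List Char) (acc : List Char) :
    (r.foldl stepA (true, true, acc)).2.2 = acc ++ pvArmedOut r := by
  induction r generalizing acc with
  | nil => simp [pvArmedOut]
  | cons c r ih =>
    by_cases hc : c = ' '
    · simp [List.foldl_cons, stepA, hc, ih, pvArmedOut]
    · simp [List.foldl_cons, stepA, hc, stepA_phase3, pvArmedOut]

theorem stepA_out (l : List Char) (acc : List Char) :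
    (l.foldl stepA (false, true, acc)).2.2 = acc ++ pvOut l := by
  induction l generalizing acc with
  | nil => simp [pvOut]
  | cons c r ih =>
    by_cases hc : c = ' '
    · simp [List.foldl_cons, stepA, hc, stepA_armed, pvOut]
    · simp [List.foldl_cons, stepA, hc, ih, pvOut]

theorem stepB_disarmed (r : List Char) (out : List Char) :
    r.foldl stepB (false, out) = (false, out ++ r.map pvLower) := by
  induction r generalizing out with
  | nil => simp
  | cons c r ih =>
    by_cases hc : c = ' '
    · simp [List.foldl_cons, stepB, hc, ih, pvLower]
    · by_cases hl : 97 ≤ c.toNat ∧ c.toNat ≤ 122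
      · simp [List.foldl_cons, stepB, hc, hl, ih, pvLower]
      · simp [List.foldl_cons, stepB, hc, hl, ih, pvLower]

theorem stepB_armed (r : List Char) (out : List Char) :
    (r.foldl stepB (true, out)).2 = out ++ pvArmedOut r := by
  induction r generalizing out with
  | nil => simp [pvArmedOut]
  | cons c r ih =>
    by_cases hc : c = ' '
    · simp [List.foldl_cons, stepB, hc, ih, pvArmedOut]
    · simp [List.foldl_cons, stepB, hc, stepB_disarmed, pvArmedOut]

theorem pvOut_split (l : List Char) :
    pvOut l = (l.takeWhile (· ≠ ' ')).map pyToMaj ++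
      (match l.dropWhile (· ≠ ' ') with
       | [] => []
       | _ :: r' => ' ' :: pvArmedOut r') := by
  induction l with
  | nil => simp [pvOut]
  | cons c r ih =>
    by_cases hc : c = ' '
    · simp [pvOut, hc, List.takeWhile, List.dropWhile]
    · simpa [pvOut, hc, List.takeWhile, List.dropWhile] using ih

theorem alt_eq_pvOut (str_arg : String) :
    full_name_without_functions_alt str_arg = String.mk (pvOut str_arg.toList) := by
  unfold full_name_without_functions_alt
  rw [pvOut_split]
  cases h : str_arg.toList.dropWhile (· ≠ ' ') with
  | nil => simp only [ne_eq, decide_not] at h ⊢; rw [h]; simp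
  | cons x r' =>
      simp only [ne_eq, decide_not] at h ⊢
      rw [h]; simp
      simp [stepB_armed]

-- ===== VERDICT (by name: the statement is the Claim_ definition above) =====
theorem full_name_without_functions_spec : Claim_equal_full_name_without_functions := by
  intro str_arg _ _
  unfold Spec_full_name_without_functions full_name_without_functions
  rw [alt_eq_pvOut, stepA_out]
  simp
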